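-- pv_equiv track=rewrite | github.com/JayLee121/Final-Project | back_end.py | get_restaurant_votes
-- ===== SOURCE A (Python) =====
-- def get_restaurant_votes(name_p, site_p):
--     res_data_dict = {1: '新生南路麥當勞',2: '順園小館',3: '辛殿公館店',4: '鍋in',5: '貳樓公館店'}
--     restaurant_dict = {}
--     for i in range(len(name_p)):
--         user_name = name_p[i]
--         for site in site_p[i]:
--                 restaurant = res_data_dict[site]
--                 if restaurant not in restaurant_dict: restaurant_dict[restaurant] = [user_name]
--                 else: restaurant_dict[restaurant].append(user_name)
--     return restaurant_dict
-- ===== SOURCE B (Python) =====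
-- def get_restaurant_votes(name_p, site_p):
--     res_data_dict = {1: '新生南路麥當勞', 2: '順園小館', 3: '辛殿公館店', 4: '鍋in', 5: '貳樓公館店'}
--     votes = [(res_data_dict[s], name_p[i]) for i in range(len(name_p)) for s in site_p[i]]
--     order = []
--     for r, _ in votes:
--         if r not in order:
--             order.append(r)
--     return {r: [n for rr, n in votes if rr == r] for r in order}
-- ===== Notes on version B (the rewrite author's own statement) =====
-- stated objective: alternative
-- what changed: B replaces A's single-pass dict-building loop by flattening all (restaurant, voter) votes once, computing the first-seen restaurant order, and then grouping with one per-restaurant scan of the flat vote list.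
import Mathlib
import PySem

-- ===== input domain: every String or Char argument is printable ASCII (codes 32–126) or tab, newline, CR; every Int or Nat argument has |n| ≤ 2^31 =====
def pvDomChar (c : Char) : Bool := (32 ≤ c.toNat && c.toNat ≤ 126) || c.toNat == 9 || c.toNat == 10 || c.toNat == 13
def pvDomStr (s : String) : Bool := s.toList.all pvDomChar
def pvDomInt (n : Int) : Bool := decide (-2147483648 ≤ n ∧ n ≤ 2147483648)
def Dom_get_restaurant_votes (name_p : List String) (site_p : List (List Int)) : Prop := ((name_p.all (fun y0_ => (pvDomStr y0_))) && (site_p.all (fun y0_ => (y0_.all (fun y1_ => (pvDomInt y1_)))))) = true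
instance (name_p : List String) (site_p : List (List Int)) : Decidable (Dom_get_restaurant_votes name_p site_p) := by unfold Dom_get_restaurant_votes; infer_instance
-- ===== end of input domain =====

-- B flattens all (restaurant, voter) votes once and groups them by per-restaurant scans,
-- instead of A's single-pass dict building; same return value (alternative decomposition).

-- shared constant table (data only): the res_data_dict literal of the Python source
def pvResData : PySem.Dict Int String :=
  PySem.Dict.ofList [(1, "新生南路麥當勞"), (2, "順園小館"), (3, "辛殿公館店"), (4, "鍋in"), (5, "貳樓公館店")]

-- ===== PORT A =====
def get_restaurant_votes (name_p : List String) (site_p : List (List Int)) : List (String × List String) :=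
  let d := (PySem.List.pyRange 0 (name_p.length) 1).foldl (fun d i =>
    let user_name := PySem.List.pyGetD name_p i ""
    (PySem.List.pyGetD site_p i []).foldl (fun d site =>
      let restaurant := pvResData.getD site ""
      if ¬ d.contains restaurant then d.insert restaurant [user_name]
      else d.insert restaurant (d.getD restaurant [] ++ [user_name])) d) PySem.Dict.empty
  d.items

-- ===== PORT B =====
def get_restaurant_votes_alt (name_p : List String) (site_p : List (List Int)) : List (String × List String) :=
  let votes := (PySem.List.pyRange 0 (name_p.length) 1).flatMap (fun i =>
    (PySem.List.pyGetD site_p i []).map (fun s => (pvResData.getD s "", PySem.List.pyGetD name_p i "")))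
  let order := votes.foldl (fun o p => PySem.Set.add o p.1) PySem.Set.empty
  order.map (fun r => (r, votes.filterMap (fun p => if p.1 == r then some p.2 else none)))

-- ===== PRECONDITION & SPEC =====
-- Pre_ excludes exactly the inputs where the Python A raises: IndexError when site_p is
-- shorter than name_p, and KeyError when some visited site is not a key of res_data_dict (1..5).
def Pre_get_restaurant_votes (name_p : List String) (site_p : List (List Int)) : Prop :=
  name_p.length ≤ site_p.length ∧
    ∀ l ∈ site_p.take name_p.length, ∀ s ∈ l, 1 ≤ s ∧ s ≤ 5
instance (name_p : List String) (site_p : List (List Int)) : Decidable (Pre_get_restaurant_votes name_p site_p) := by unfold Pre_get_restaurant_votes; infer_instance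

def pvWitness_get_restaurant_votes : List String × List (List Int) :=
  (["ann", "bob", "ann"], [[1, 2], [2], [2, 2, 5]])

def Spec_get_restaurant_votes (name_p : List String) (site_p : List (List Int)) (out : List (String × List String)) : Prop := out = get_restaurant_votes_alt name_p site_p
instance (name_p : List String) (site_p : List (List Int)) (out : List (String × List String)) : Decidable (Spec_get_restaurant_votes name_p site_p out) := by unfold Spec_get_restaurant_votes; infer_instance

-- ===== CLAIM (what is proved, stated in full; the proofs are below) =====
def Claim_equal_get_restaurant_votes : Prop := ∀ (name_p : List String) (site_p : List (List Int)), Dom_get_restaurant_votes name_p site_p → Pre_get_restaurant_votes name_p site_p → Spec_get_restaurant_votes name_p site_p (get_restaurant_votes name_p site_p)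

-- ===== LEMMAS AND PROOFS =====

-- A's per-vote dict update (set [u] if absent, append u otherwise) is the modify-append pattern
theorem pv_step_eq_modify (d : PySem.Dict String (List String)) (r : String) (u : String) :
    (if ¬ d.contains r then d.insert r [u] else d.insert r (d.getD r [] ++ [u]))
      = d.modify r [] (· ++ [u]) := by
  simp only [PySem.Dict.modify]
  by_cases h : d.contains r
  · simp [h]
  · rw [PySem.Dict.getD_of_not_contains _ _ (by simp only [Bool.not_eq_true] at h; exact h)]
    simp [h]

-- B's comprehension [n for rr, n in votes if rr == r] is filter-then-project
theorem pv_filterMap_eq (votes : List (String × String)) (r : String) :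
    votes.filterMap (fun p => if p.1 == r then some p.2 else none)
      = (votes.filter (fun p => p.1 == r)).map (·.2) := by
  induction votes with
  | nil => rfl
  | cons p t ih =>
      by_cases h : p.1 = r <;> simp [List.filter_cons, h] <;> simpa using ih

-- the grouping dict built from the flat vote list, characterised as a map over first-seen keys
theorem pv_dict_items (votes : List (String × String)) :
    (votes.foldl (fun d p => PySem.Dict.modify d p.1 [] (· ++ [p.2])) PySem.Dict.empty).items
      = (PySem.Set.ofList (votes.map (·.1))).map
          (fun r => (r, (votes.filter (fun p => p.1 == r)).map (·.2))) := by
  have hnd := PySem.Dict.nodup_keys_foldl_modify_key votes (·.1) [] (fun d p => (· ++ [p.2]))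
    PySem.Dict.empty (by simp)
  rw [PySem.Dict.items_eq_map_keys _ hnd []]
  rw [PySem.Dict.keys_foldl_modify_key]
  simp only [PySem.Dict.keys_empty]
  rw [PySem.Set.update_nil_left]
  apply List.map_congr_left
  intro r _
  rw [PySem.Dict.getD_foldl_modify_append]
  simp [PySem.Dict.getD_empty]

-- B's first-seen order loop is set(votes projected to restaurants)
theorem pv_order (votes : List (String × String)) :
    votes.foldl (fun o p => PySem.Set.add o p.1) PySem.Set.empty
      = PySem.Set.ofList (votes.map (fun p => p.1)) := by
  rw [← PySem.Set.update_nil_left, PySem.Set.update_map_eq_foldl_add]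
  rfl

-- A's nested index loop over the votes equals one fold over the flattened vote list
theorem pv_nested_eq_flat (name_p : List String) (site_p : List (List Int)) :
    (PySem.List.pyRange 0 (name_p.length) 1).foldl (fun d i =>
      (PySem.List.pyGetD site_p i []).foldl (fun d site =>
        PySem.Dict.modify d (pvResData.getD site "") [] (· ++ [PySem.List.pyGetD name_p i ""])) d)
      PySem.Dict.empty
    = List.foldl (fun d p => PySem.Dict.modify d p.1 [] (· ++ [p.2])) PySem.Dict.empty
        ((PySem.List.pyRange 0 (name_p.length) 1).flatMap (fun i =>
          (PySem.List.pyGetD site_p i []).map (fun s => (pvResData.getD s "", PySem.List.pyGetD name_p i "")))) := by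
  rw [List.foldl_flatMap]
  simp only [List.foldl_map]

theorem pv_main (name_p : List String) (site_p : List (List Int)) :
    get_restaurant_votes name_p site_p = get_restaurant_votes_alt name_p site_p := by
  unfold get_restaurant_votes get_restaurant_votes_alt
  simp only [pv_step_eq_modify]
  rw [pv_nested_eq_flat, pv_dict_items, pv_order]
  simp only [pv_filterMap_eq]

-- ===== VERDICT (by name: the statement is the Claim_ definition above) =====
theorem get_restaurant_votes_spec : Claim_equal_get_restaurant_votes := by
  intro name_p site_p _ _
  exact pv_main name_p site_p
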